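-- pv_equiv track=rewrite | github.com/GabyRkt/Invest | simulation.py | get_invested_amount
-- ===== SOURCE A (Python) =====
-- def get_invested_amount(dates, initial_amount, recurring_contribution, frequency):
--     """
--     Calculate the total amount invested over time based on frequency
--     """
--     freq_map = {"Mensuel": 1, "Trimestriel": 3, "Semestriel": 6, "Annuel": 12}
--     months_between = freq_map[frequency]
--
--     invested = []
--     total = initial_amount
--
--     for i in range(len(dates)):
--         if i != 0 and i % months_between == 0:
--             total += recurring_contribution
--         invested.append(total)
--
--     return invested
-- ===== SOURCE B (Python) =====
-- def get_invested_amount(dates, initial_amount, recurring_contribution, frequency):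
--     """
--     Calculate the total amount invested over time based on frequency
--     """
--     freq_map = {"Mensuel": 1, "Trimestriel": 3, "Semestriel": 6, "Annuel": 12}
--     months_between = freq_map[frequency]
--     return [initial_amount + recurring_contribution * (i // months_between)
--             for i in range(len(dates))]
-- ===== Notes on version B (the rewrite author's own statement) =====
-- stated objective: simpler
-- what changed: Replaced the running-total accumulator loop with a closed-form list comprehension: element i is initial_amount + recurring_contribution * (i // months_between), computed independently.
import Mathlib
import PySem

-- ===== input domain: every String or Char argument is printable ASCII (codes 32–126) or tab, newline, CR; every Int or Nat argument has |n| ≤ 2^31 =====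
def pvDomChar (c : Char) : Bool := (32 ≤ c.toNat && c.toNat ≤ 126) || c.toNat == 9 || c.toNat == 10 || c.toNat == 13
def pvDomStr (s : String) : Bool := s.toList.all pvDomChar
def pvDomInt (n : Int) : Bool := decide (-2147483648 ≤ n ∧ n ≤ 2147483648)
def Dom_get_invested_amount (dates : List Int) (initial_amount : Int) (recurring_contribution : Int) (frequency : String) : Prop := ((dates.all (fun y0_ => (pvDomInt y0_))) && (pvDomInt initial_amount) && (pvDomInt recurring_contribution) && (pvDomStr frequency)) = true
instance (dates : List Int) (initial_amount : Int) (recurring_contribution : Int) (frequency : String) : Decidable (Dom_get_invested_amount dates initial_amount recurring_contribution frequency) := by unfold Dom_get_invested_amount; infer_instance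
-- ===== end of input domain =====

-- B replaces A's running-total loop with an independent closed-form formula per index; objective: simpler.

-- ===== PORT A =====
-- freq_map literal shared by both ports (the same dict literal appears in Source A and Source B)
def pvFreqMap : PySem.Dict String Int :=
  PySem.Dict.ofList [("Mensuel", 1), ("Trimestriel", 3), ("Semestriel", 6), ("Annuel", 12)]

-- A: running total, appended each iteration; freq_map[frequency] raises KeyError outside Pre_ (getD 0 is never reached inside Pre_)
def get_invested_amount (dates : List Int) (initial_amount : Int) (recurring_contribution : Int) (frequency : String) : List Int :=
  let months_between := (pvFreqMap.get? frequency).getD 0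
  (((PySem.List.pyRange 0 dates.length 1).foldl
      (fun (s : List Int × Int) i =>
        let total := if i ≠ 0 ∧ PySem.Int.mod i months_between = 0 then s.2 + recurring_contribution else s.2
        (s.1 ++ [total], total))
      ([], initial_amount))).1

-- ===== PORT B =====
def get_invested_amount_alt (dates : List Int) (initial_amount : Int) (recurring_contribution : Int) (frequency : String) : List Int :=
  let months_between := (pvFreqMap.get? frequency).getD 0
  (PySem.List.pyRange 0 dates.length 1).map
    (fun i => initial_amount + recurring_contribution * PySem.Int.floordiv i months_between)

-- ===== PRECONDITION & SPEC =====
-- Pre_ excludes frequencies absent from freq_map, on which A raises KeyError.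
def Pre_get_invested_amount (dates : List Int) (initial_amount : Int) (recurring_contribution : Int) (frequency : String) : Prop :=
  frequency = "Mensuel" ∨ frequency = "Trimestriel" ∨ frequency = "Semestriel" ∨ frequency = "Annuel"
instance (dates : List Int) (initial_amount : Int) (recurring_contribution : Int) (frequency : String) : Decidable (Pre_get_invested_amount dates initial_amount recurring_contribution frequency) := by unfold Pre_get_invested_amount; infer_instance

def pvWitness_get_invested_amount : List Int × Int × Int × String := ([0, 1, 2, 3], 100, 10, "Trimestriel")

def Spec_get_invested_amount (dates : List Int) (initial_amount : Int) (recurring_contribution : Int) (frequency : String) (out : List Int) : Prop := out = get_invested_amount_alt dates initial_amount recurring_contribution frequency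
instance (dates : List Int) (initial_amount : Int) (recurring_contribution : Int) (frequency : String) (out : List Int) : Decidable (Spec_get_invested_amount dates initial_amount recurring_contribution frequency out) := by unfold Spec_get_invested_amount; infer_instance

-- ===== CLAIM (what is proved, stated in full; the proofs are below) =====
def Claim_equal_get_invested_amount : Prop := ∀ (dates : List Int) (initial_amount : Int) (recurring_contribution : Int) (frequency : String), Dom_get_invested_amount dates initial_amount recurring_contribution frequency → Pre_get_invested_amount dates initial_amount recurring_contribution frequency → Spec_get_invested_amount dates initial_amount recurring_contribution frequency (get_invested_amount dates initial_amount recurring_contribution frequency)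

-- ===== LEMMAS AND PROOFS =====

-- floor-division boundary step for the divisors freq_map can produce
lemma pv_floordiv_step (m : Int) (hm : m = 1 ∨ m = 3 ∨ m = 6 ∨ m = 12) (i : Int) (_hi : 1 ≤ i) :
    PySem.Int.floordiv i m =
      PySem.Int.floordiv (i - 1) m + (if PySem.Int.mod i m = 0 then 1 else 0) := by
  have h1 : (0:Int) < m := by rcases hm with h|h|h|h <;> omega
  rw [PySem.Int.floordiv_eq_ediv_of_pos h1, PySem.Int.floordiv_eq_ediv_of_pos h1,
      PySem.Int.mod_eq_emod_of_pos h1]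
  rcases hm with h|h|h|h <;> subst h <;> split_ifs <;> omega

-- loop invariant: after processing range(0, n), the pair is (map of the closed form, last total)
lemma pv_loop_eq (initial_amount recurring_contribution m : Int)
    (hm : m = 1 ∨ m = 3 ∨ m = 6 ∨ m = 12) (n : Nat) :
    (PySem.List.pyRange 0 n 1).foldl
      (fun (s : List Int × Int) i =>
        let total := if i ≠ 0 ∧ PySem.Int.mod i m = 0 then s.2 + recurring_contribution else s.2
        (s.1 ++ [total], total))
      ([], initial_amount)
    = ((PySem.List.pyRange 0 n 1).map
         (fun i => initial_amount + recurring_contribution * PySem.Int.floordiv i m),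
       if n = 0 then initial_amount
       else initial_amount + recurring_contribution * PySem.Int.floordiv ((n : Int) - 1) m) := by
  have h1 : (0:Int) < m := by rcases hm with h|h|h|h <;> omega
  induction n with
  | zero => simp
  | succ k ih =>
    have hk : (0:Int) ≤ (k:Int) := by positivity
    have hsplit : PySem.List.pyRange 0 ((k:Int)+1) 1 = PySem.List.pyRange 0 (k:Int) 1 ++ [(k:Int)] :=
      PySem.List.pyRange_one_succ_right hk
    have hcast : ((k+1 : Nat) : Int) = (k:Int) + 1 := by push_cast; ring
    rw [hcast, hsplit, List.foldl_append, List.map_append, ih]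
    by_cases hk0 : k = 0
    · subst hk0
      have hd0 : PySem.Int.floordiv 0 m = 0 := by
        rw [PySem.Int.floordiv_eq_ediv_of_pos h1]; simp
      simp [hd0]
    · have hk1 : (1:Int) ≤ (k:Int) := by
        have : 1 ≤ k := Nat.one_le_iff_ne_zero.mpr hk0
        exact_mod_cast this
      have hstep := pv_floordiv_step m hm (k:Int) hk1
      have hkne : ((k:Int)) ≠ 0 := by omega
      simp only [List.foldl_cons, List.foldl_nil, List.map_cons, List.map_nil, if_neg hk0]
      have hsub : ((k:Int) + 1 - 1) = (k:Int) := by ring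
      rw [hsub, hstep]
      by_cases hmod : PySem.Int.mod (k:Int) m = 0
      · rw [if_pos hmod]
        simp only [if_pos (And.intro hkne hmod)]
        refine Prod.ext ?_ ?_ <;> simp <;> ring
      · rw [if_neg hmod]
        simp only [if_neg (fun h : _ ∧ _ => hmod h.2)]
        refine Prod.ext ?_ ?_ <;> simp <;> ring

-- ===== VERDICT (by name: the statement is the Claim_ definition above) =====
theorem get_invested_amount_spec : Claim_equal_get_invested_amount := by
  intro dates ia rc freq _ hpre
  unfold Spec_get_invested_amount get_invested_amount get_invested_amount_alt
  have hm : (pvFreqMap.get? freq).getD 0 = 1 ∨ (pvFreqMap.get? freq).getD 0 = 3 ∨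
      (pvFreqMap.get? freq).getD 0 = 6 ∨ (pvFreqMap.get? freq).getD 0 = 12 := by
    rcases hpre with h|h|h|h <;> subst h <;> decide
  show (((PySem.List.pyRange 0 dates.length 1).foldl
      (fun (s : List Int × Int) i =>
        let total := if i ≠ 0 ∧ PySem.Int.mod i ((pvFreqMap.get? freq).getD 0) = 0 then s.2 + rc else s.2
        (s.1 ++ [total], total))
      ([], ia))).1
    = (PySem.List.pyRange 0 dates.length 1).map
        (fun i => ia + rc * PySem.Int.floordiv i ((pvFreqMap.get? freq).getD 0))
  rw [pv_loop_eq ia rc _ hm dates.length]
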